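-- pv_equiv track=rewrite | github.com/lejaja9/Riddlers | Riddles/Euler_112.py | not_bouncy
-- ===== SOURCE A (Python) =====
-- def not_bouncy(n):
--     if n < 10:
--         return True
--     increasing, decreasing = True, True
--     number = n
--     last_digit = n%10
--     while number > 9 and (increasing or decreasing):
--         number = number//10
--         second_to_last_digit = number%10
--         if increasing:
--             if second_to_last_digit < last_digit:
--                 increasing = False
--         if decreasing:
--             if second_to_last_digit > last_digit:
--                 decreasing = False
--         last_digit = second_to_last_digit
--     return increasing or decreasing
-- ===== SOURCE B (Python) =====
-- def not_bouncy(n):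
--     if n < 10:
--         return True
--     d = str(n)
--     return d == ''.join(sorted(d)) or d == ''.join(sorted(d, reverse=True))
-- ===== Notes on version B (the rewrite author's own statement) =====
-- stated objective: simpler
-- what changed: Replaced A's incremental two-flag digit loop (floordiv/mod with early exit) by forming the digit string once and comparing it with its ascending and descending sorts.
import Mathlib
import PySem

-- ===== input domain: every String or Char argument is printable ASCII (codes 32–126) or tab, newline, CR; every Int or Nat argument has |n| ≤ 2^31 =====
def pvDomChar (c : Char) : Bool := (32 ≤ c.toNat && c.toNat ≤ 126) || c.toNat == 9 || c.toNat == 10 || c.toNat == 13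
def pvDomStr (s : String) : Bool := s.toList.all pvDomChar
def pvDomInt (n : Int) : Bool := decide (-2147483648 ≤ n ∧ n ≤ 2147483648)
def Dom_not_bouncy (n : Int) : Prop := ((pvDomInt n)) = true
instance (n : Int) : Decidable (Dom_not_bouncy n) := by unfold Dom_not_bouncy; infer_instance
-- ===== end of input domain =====

-- B replaces A's incremental two-flag digit loop by sorting the digit string and
-- comparing with the ascending and descending sorts (objective: simpler).


-- ===== PORT A =====
-- the while loop of A, with its state (increasing, decreasing, number, last_digit)
def pvLoopA (inc dec : Bool) (number last : Int) : Bool :=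
  if _h : 9 < number ∧ (inc || dec) = true then
    let number' := PySem.Int.floordiv number 10
    let s := PySem.Int.mod number' 10
    let inc' := if inc then (if s < last then false else inc) else inc
    let dec' := if dec then (if last < s then false else dec) else dec
    pvLoopA inc' dec' number' s
  else inc || dec
termination_by number.toNat
decreasing_by
  rw [PySem.Int.floordiv, Int.fdiv_eq_ediv]
  omega

def not_bouncy (n : Int) : Bool :=
  if n < 10 then true
  else pvLoopA true true n (PySem.Int.mod n 10)

-- ===== PORT B =====
-- str(n) is handled as its list of characters; the Python string comparisons
-- d == ''.join(sorted(d)) are char-list equalities here (exact: join of sorted chars).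
def not_bouncy_alt (n : Int) : Bool :=
  if n < 10 then true
  else
    let d := PySem.Int.toChars n
    (d == PySem.List.sorted d (fun c => c) false) || (d == PySem.List.sorted d (fun c => c) true)

-- ===== PRECONDITION & SPEC =====
def Spec_not_bouncy (n : Int) (out : Bool) : Prop := out = not_bouncy_alt n
instance (n : Int) (out : Bool) : Decidable (Spec_not_bouncy n out) := by unfold Spec_not_bouncy; infer_instance

-- ===== CLAIM (what is proved, stated in full; the proofs are below) =====
def Claim_equal_not_bouncy : Prop := ∀ (n : Int), Dom_not_bouncy n → Spec_not_bouncy n (not_bouncy n)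

-- ===== LEMMAS AND PROOFS =====

-- digits of m, least significant first (never empty)
def pvDigs (m : Nat) : List Nat :=
  if h : m < 10 then [m] else m % 10 :: pvDigs (m / 10)
termination_by m
decreasing_by omega

-- adjacent non-decrease / non-increase of a digit list
def pvChLE : List Nat → Bool
  | a :: b :: t => decide (a ≤ b) && pvChLE (b :: t)
  | _ => true

def pvChGE : List Nat → Bool
  | a :: b :: t => decide (b ≤ a) && pvChGE (b :: t)
  | _ => true

theorem pvDigs_lt10 (m : Nat) : ∀ x ∈ pvDigs m, x < 10 := by
  induction m using Nat.strong_induction_on with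
  | _ m ih =>
    rw [pvDigs]
    split
    · intro x hx; simp at hx; omega
    · intro x hx
      rcases List.mem_cons.mp hx with h | h
      · omega
      · exact ih (m / 10) (by omega) x h

theorem pvDigs_low (m : Nat) (h : m < 10) : pvDigs m = [m] := by rw [pvDigs]; simp [h]

theorem pvDigs_high (m : Nat) (h : ¬ m < 10) : pvDigs m = m % 10 :: pvDigs (m / 10) := by
  rw [pvDigs]; simp [h]

theorem pvChLE_cons (a k : Nat) :
    pvChLE (a :: pvDigs k) = (decide (a ≤ k % 10) && pvChLE (pvDigs k)) := by
  by_cases h : k < 10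
  · rw [pvDigs_low k h, Nat.mod_eq_of_lt h]; simp [pvChLE]
  · rw [pvDigs_high k h]; simp [pvChLE]

theorem pvChGE_cons (a k : Nat) :
    pvChGE (a :: pvDigs k) = (decide (k % 10 ≤ a) && pvChGE (pvDigs k)) := by
  by_cases h : k < 10
  · rw [pvDigs_low k h, Nat.mod_eq_of_lt h]; simp [pvChGE]
  · rw [pvDigs_high k h]; simp [pvChGE]

theorem pv_fdiv_cast (m : Nat) : PySem.Int.floordiv (m : Int) 10 = ((m / 10 : Nat) : Int) := by
  rw [PySem.Int.floordiv, Int.fdiv_eq_ediv]; omega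

theorem pv_fmod_cast (m : Nat) : PySem.Int.mod (m : Int) 10 = ((m % 10 : Nat) : Int) := by
  rw [PySem.Int.mod, Int.fmod_eq_emod]; omega

-- the loop computes exactly the two adjacency chains of the digit list
theorem pvLoopA_spec (m : Nat) : ∀ inc dec : Bool,
    pvLoopA inc dec (m : Int) ((m % 10 : Nat) : Int) =
      ((inc && pvChLE (pvDigs m)) || (dec && pvChGE (pvDigs m))) := by
  induction m using Nat.strong_induction_on with
  | _ m ih =>
    intro inc dec
    by_cases hm : m < 10
    · have hneg : ¬ (9 < (m : Int) ∧ (inc || dec) = true) := by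
        rintro ⟨h1, _⟩; omega
      rw [pvLoopA, dif_neg hneg, pvDigs_low m hm]
      simp [pvChLE, pvChGE]
    · by_cases hflag : (inc || dec) = true
      · rw [pvLoopA]
        have hc : 9 < (m : Int) ∧ (inc || dec) = true := ⟨by omega, hflag⟩
        rw [dif_pos hc]
        simp only [pv_fdiv_cast, pv_fmod_cast, Nat.cast_lt]
        have hi : (if inc = true then (if m / 10 % 10 < m % 10 then false else inc) else inc)
            = (inc && !decide (m / 10 % 10 < m % 10)) := by
          cases inc <;> by_cases h : m / 10 % 10 < m % 10 <;> simp [h]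
        have hd : (if dec = true then (if m % 10 < m / 10 % 10 then false else dec) else dec)
            = (dec && !decide (m % 10 < m / 10 % 10)) := by
          cases dec <;> by_cases h : m % 10 < m / 10 % 10 <;> simp [h]
        rw [hi, hd, ih (m / 10) (by omega)]
        rw [pvDigs_high m hm, pvChLE_cons, pvChGE_cons]
        have e1 : decide (m % 10 ≤ m / 10 % 10) = !decide (m / 10 % 10 < m % 10) := by
          by_cases h : m / 10 % 10 < m % 10 <;> simp [h] <;> omega
        have e2 : decide (m / 10 % 10 ≤ m % 10) = !decide (m % 10 < m / 10 % 10) := by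
          by_cases h : m % 10 < m / 10 % 10 <;> simp [h] <;> omega
        rw [e1, e2]
        simp [Bool.and_assoc]
      · have hneg : ¬ (9 < (m : Int) ∧ (inc || dec) = true) := by
          rintro ⟨_, h2⟩; exact hflag h2
        rw [pvLoopA, dif_neg hneg]
        cases inc <;> cases dec <;> simp_all

-- Nat.toDigitsCore renders exactly the reversed digit list
theorem pv_toDigitsCore_eq : ∀ (f n : Nat) (acc : List Char), n < f →
    Nat.toDigitsCore 10 f n acc = ((pvDigs n).map Nat.digitChar).reverse ++ acc := by
  intro f
  induction f with
  | zero => intro n acc h; omega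
  | succ f ihf =>
    intro n acc h
    by_cases hn : n < 10
    · have hz : n / 10 = 0 := Nat.div_eq_of_lt hn
      simp [Nat.toDigitsCore, hz, pvDigs_low n hn, Nat.mod_eq_of_lt hn]
    · have hz : ¬ (n / 10 = 0) := by omega
      have hlt : n / 10 < f := by omega
      simp only [Nat.toDigitsCore, hz, if_false]
      rw [ihf (n / 10) (Nat.digitChar (n % 10) :: acc) hlt, pvDigs_high n hn]
      simp

theorem pv_toChars_eq (m : Nat) :
    PySem.Int.toChars (m : Int) = ((pvDigs m).map Nat.digitChar).reverse := by
  have : ¬ ((m : Int) < 0) := by omega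
  simp only [PySem.Int.toChars, this, if_false, Int.toNat_natCast, Nat.toDigits]
  rw [pv_toDigitsCore_eq (m + 1) m [] (by omega)]
  simp

theorem pv_digitChar_le_iff (a b : Nat) (ha : a < 10) (hb : b < 10) :
    Nat.digitChar a ≤ Nat.digitChar b ↔ a ≤ b := by
  interval_cases a <;> interval_cases b <;> decide

theorem pv_chLE_iff_pairwise : ∀ L : List Nat,
    pvChLE L = true ↔ L.Pairwise (fun a b => a ≤ b) := by
  intro L
  induction L with
  | nil => simp [pvChLE]
  | cons a t ih =>
    cases t with
    | nil => simp [pvChLE]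
    | cons b t' =>
      rw [List.pairwise_cons]
      constructor
      · intro h
        have h1 : a ≤ b := by simp [pvChLE] at h; exact h.1
        have h2 : pvChLE (b :: t') = true := by simp [pvChLE] at h; exact h.2
        have hp := ih.mp h2
        refine ⟨?_, hp⟩
        intro y hy
        rcases List.mem_cons.mp hy with rfl | hy'
        · exact h1
        · exact le_trans h1 (List.rel_of_pairwise_cons hp hy')
      · rintro ⟨hall, hp⟩
        have h1 : a ≤ b := hall b (by simp)
        simp [pvChLE, h1]
        exact ih.mpr hp

theorem pv_chGE_iff_pairwise : ∀ L : List Nat,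
    pvChGE L = true ↔ L.Pairwise (fun a b => b ≤ a) := by
  intro L
  induction L with
  | nil => simp [pvChGE]
  | cons a t ih =>
    cases t with
    | nil => simp [pvChGE]
    | cons b t' =>
      rw [List.pairwise_cons]
      constructor
      · intro h
        have h1 : b ≤ a := by simp [pvChGE] at h; exact h.1
        have h2 : pvChGE (b :: t') = true := by simp [pvChGE] at h; exact h.2
        have hp := ih.mp h2
        refine ⟨?_, hp⟩
        intro y hy
        rcases List.mem_cons.mp hy with rfl | hy'
        · exact h1
        · exact le_trans (List.rel_of_pairwise_cons hp hy') h1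
      · rintro ⟨hall, hp⟩
        have h1 : b ≤ a := hall b (by simp)
        simp [pvChGE, h1]
        exact ih.mpr hp

-- a char list equals its ascending (descending) sort iff it is pairwise ordered
theorem pv_eq_sorted_iff (cs : List Char) :
    (cs == PySem.List.sorted cs (fun c => c) false) = true ↔
      cs.Pairwise (fun a b => a ≤ b) := by
  rw [beq_iff_eq]
  constructor
  · intro h
    have := PySem.List.sorted_pairwise cs (fun c => c)
    rw [← h] at this
    exact this
  · intro h
    exact (PySem.List.sorted_eq_self_of_pairwise cs (fun c => c) h).symm

theorem pv_eq_sorted_rev_iff (cs : List Char) :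
    (cs == PySem.List.sorted cs (fun c => c) true) = true ↔
      cs.Pairwise (fun a b => b ≤ a) := by
  rw [beq_iff_eq]
  constructor
  · intro h
    have := PySem.List.sorted_pairwise_rev cs (fun c => c)
    rw [← h] at this
    exact this
  · intro h
    exact (PySem.List.sorted_rev_eq_self_of_pairwise cs (fun c => c) h).symm

theorem pv_pairwise_chars (m : Nat) :
    (((pvDigs m).map Nat.digitChar).reverse.Pairwise (fun a b : Char => a ≤ b) ↔
      (pvDigs m).Pairwise (fun a b => b ≤ a)) := by
  rw [List.pairwise_reverse, List.pairwise_map]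
  constructor <;> intro h <;>
    refine h.imp_of_mem ?_ <;> intro a b ha hb hr
  · exact (pv_digitChar_le_iff b a (pvDigs_lt10 m b hb) (pvDigs_lt10 m a ha)).mp hr
  · exact (pv_digitChar_le_iff b a (pvDigs_lt10 m b hb) (pvDigs_lt10 m a ha)).mpr hr

theorem pv_pairwise_chars_rev (m : Nat) :
    (((pvDigs m).map Nat.digitChar).reverse.Pairwise (fun a b : Char => b ≤ a) ↔
      (pvDigs m).Pairwise (fun a b => a ≤ b)) := by
  rw [List.pairwise_reverse, List.pairwise_map]
  constructor <;> intro h <;>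
    refine h.imp_of_mem ?_ <;> intro a b ha hb hr
  · exact (pv_digitChar_le_iff a b (pvDigs_lt10 m a ha) (pvDigs_lt10 m b hb)).mp hr
  · exact (pv_digitChar_le_iff a b (pvDigs_lt10 m a ha) (pvDigs_lt10 m b hb)).mpr hr

-- ===== VERDICT (by name: the statement is the Claim_ definition above) =====
theorem not_bouncy_spec : Claim_equal_not_bouncy := by
  unfold Claim_equal_not_bouncy Spec_not_bouncy
  intro n _
  by_cases hn : n < 10
  · simp [not_bouncy, not_bouncy_alt, hn]
  · rw [not_bouncy, not_bouncy_alt, if_neg hn, if_neg hn]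
    obtain ⟨m, rfl⟩ : ∃ m : Nat, n = (m : Int) :=
      ⟨n.toNat, by omega⟩
    rw [pv_fmod_cast, pvLoopA_spec m true true]
    rw [pv_toChars_eq m]
    apply Bool.eq_iff_iff.mpr
    simp only [Bool.or_eq_true, Bool.true_and]
    rw [pv_eq_sorted_iff, pv_eq_sorted_rev_iff, pv_pairwise_chars, pv_pairwise_chars_rev,
        ← pv_chLE_iff_pairwise, ← pv_chGE_iff_pairwise]
    tauto
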